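-- pv_equiv track=rewrite | github.com/onlytaekyu/lottery | src/evaluation/backtester.py | _evaluate_matching_pairs
-- ===== SOURCE A (Python) =====
-- from typing import List, Dict, Set, Tuple, Optional, Any, Union, cast, TypeVar
--
-- def _evaluate_matching_pairs(
--     combination: List[int], draw_numbers: List[int]
-- ) -> List[Tuple[int, int]]:
--     """
--     일치하는 번호 쌍 평가
--
--     Args:
--         combination: 추천 번호 조합
--         draw_numbers: 당첨 번호
--
--     Returns:
--         List[Tuple[int, int]]: 일치하는 번호 쌍 목록
--     """
--     # 두 번호 리스트 정렬
--     sorted_combo = sorted(combination)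
--     sorted_draw = sorted(draw_numbers)
--
--     # 일치하는 쌍 찾기
--     matching_pairs = []
--     for i in range(len(sorted_combo) - 1):
--         for j in range(i + 1, len(sorted_combo)):
--             pair = (sorted_combo[i], sorted_combo[j])
--
--             # 당첨 번호에 이 쌍이 있는지 확인
--             if sorted_combo[i] in sorted_draw and sorted_combo[j] in sorted_draw:
--                 matching_pairs.append(pair)
--
--     return matching_pairs
-- ===== SOURCE B (Python) =====
-- from typing import List, Tuple
--
--
-- def _evaluate_matching_pairs(
--     combination: List[int], draw_numbers: List[int]
-- ) -> List[Tuple[int, int]]: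
--     # Filter-then-enumerate: keep the matching numbers in one pass over the
--     # sorted combination, then enumerate all pairs of the filtered list.
--     draw_set = set(draw_numbers)
--     matched = [n for n in sorted(combination) if n in draw_set]
--     pairs: List[Tuple[int, int]] = []
--     rest = matched
--     while rest:
--         x = rest[0]
--         rest = rest[1:]
--         pairs.extend((x, y) for y in rest)
--     return pairs
-- ===== Notes on version B (the rewrite author's own statement) =====
-- stated objective: faster
-- what changed: A generates every pair of the sorted combination and tests both members against the sorted draw list per pair; B filters the sorted combination once against a set of draw numbers and then enumerates all pairs of the filtered list.
import Mathlib
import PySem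

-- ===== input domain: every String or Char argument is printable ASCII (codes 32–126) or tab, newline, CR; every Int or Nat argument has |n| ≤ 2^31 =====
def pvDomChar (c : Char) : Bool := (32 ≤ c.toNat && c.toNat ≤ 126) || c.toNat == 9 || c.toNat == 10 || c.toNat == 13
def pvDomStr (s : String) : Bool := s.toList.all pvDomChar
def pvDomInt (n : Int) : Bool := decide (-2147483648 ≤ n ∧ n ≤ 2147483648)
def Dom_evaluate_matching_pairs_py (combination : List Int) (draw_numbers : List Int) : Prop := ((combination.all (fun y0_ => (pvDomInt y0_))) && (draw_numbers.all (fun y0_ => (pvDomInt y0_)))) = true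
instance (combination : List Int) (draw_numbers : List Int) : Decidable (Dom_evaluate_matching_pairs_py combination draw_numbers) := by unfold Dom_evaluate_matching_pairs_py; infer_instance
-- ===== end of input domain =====

-- B replaces A's generate-all-pairs-then-filter (two list-membership scans per pair)
-- by filter-once-then-enumerate over the filtered list; same return value.

-- ===== PORT A =====
-- pyGetD with default 0 is exact here: every index drawn from the two ranges is in range.
def evaluate_matching_pairs_py (combination : List Int) (draw_numbers : List Int) : List (Int × Int) :=
  let sorted_combo := PySem.List.sorted combination (fun x => x) false
  let sorted_draw := PySem.List.sorted draw_numbers (fun x => x) false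
  (PySem.List.pyRange 0 ((sorted_combo.length : Int) - 1) 1).foldl (fun matching_pairs i =>
    (PySem.List.pyRange (i + 1) (sorted_combo.length : Int) 1).foldl (fun matching_pairs j =>
      if sorted_draw.contains (PySem.List.pyGetD sorted_combo i 0)
          && sorted_draw.contains (PySem.List.pyGetD sorted_combo j 0) then
        matching_pairs ++ [(PySem.List.pyGetD sorted_combo i 0, PySem.List.pyGetD sorted_combo j 0)]
      else matching_pairs) matching_pairs) []

-- ===== PORT B =====
-- the 'while rest: x = rest[0]; rest = rest[1:]; pairs.extend((x, y) for y in rest)' loop of Source B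
def pairsLoop (pairs : List (Int × Int)) : List Int → List (Int × Int)
  | [] => pairs
  | x :: rest => pairsLoop (pairs ++ rest.map (fun y => (x, y))) rest

def evaluate_matching_pairs_py_alt (combination : List Int) (draw_numbers : List Int) : List (Int × Int) :=
  let draw_set := PySem.Set.ofList draw_numbers
  let matched := (PySem.List.sorted combination (fun x => x) false).filter (fun n => draw_set.contains n)
  pairsLoop [] matched

-- ===== PRECONDITION & SPEC =====
def Spec_evaluate_matching_pairs_py (combination : List Int) (draw_numbers : List Int) (out : List (Int × Int)) : Prop := out = evaluate_matching_pairs_py_alt combination draw_numbers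
instance (combination : List Int) (draw_numbers : List Int) (out : List (Int × Int)) : Decidable (Spec_evaluate_matching_pairs_py combination draw_numbers out) := by unfold Spec_evaluate_matching_pairs_py; infer_instance

-- ===== CLAIM (what is proved, stated in full; the proofs are below) =====
def Claim_equal_evaluate_matching_pairs_py : Prop := ∀ (combination : List Int) (draw_numbers : List Int), Dom_evaluate_matching_pairs_py combination draw_numbers → Spec_evaluate_matching_pairs_py combination draw_numbers (evaluate_matching_pairs_py combination draw_numbers)

-- ===== LEMMAS AND PROOFS =====

-- common reference shape: for each suffix x :: xs of l, the pairs (x, y) with y a later match, provided x matches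
def pairsSpec (p : Int → Bool) : List Int → List (Int × Int)
  | [] => []
  | x :: xs => (if p x then (xs.filter p).map (fun y => (x, y)) else []) ++ pairsSpec p xs

-- the body of A's outer loop at (Nat) index k, as a list
def aTerm (p : Int → Bool) (l : List Int) (k : Nat) : List (Int × Int) :=
  ((l.drop (k + 1)).filter (fun y => p (l.getD k 0) && p y)).map (fun y => (l.getD k 0, y))

theorem aTerm_flatMap (p : Int → Bool) (l : List Int) :
    (List.range l.length).flatMap (aTerm p l) = pairsSpec p l := by
  induction l with
  | nil => simp [pairsSpec]
  | cons x xs ih =>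
    rw [List.length_cons, List.range_succ_eq_map, List.flatMap_cons, List.flatMap_map]
    have h1 : ∀ k, aTerm p (x :: xs) (Nat.succ k) = aTerm p xs k := by
      intro k; simp [aTerm]
    simp only [h1]
    rw [ih]
    have h0 : aTerm p (x :: xs) 0
        = (if p x then (xs.filter p).map (fun y => (x, y)) else []) := by
      cases hp : p x <;> simp [aTerm, hp]
    rw [h0]; rfl

theorem aTerm_flatMap_pred (p : Int → Bool) (l : List Int) :
    (List.range (l.length - 1)).flatMap (aTerm p l) = pairsSpec p l := by
  cases l with
  | nil => simp [pairsSpec]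
  | cons x xs =>
    rw [← aTerm_flatMap p (x :: xs), List.length_cons]
    have hlast : aTerm p (x :: xs) xs.length = [] := by
      simp [aTerm, List.drop_of_length_le]
    rw [Nat.add_sub_cancel, List.range_succ, List.flatMap_append]
    simp [hlast]

-- A's nested index loops compute pairsSpec of the membership predicate
theorem loopA_eq (l sd : List Int) :
    (PySem.List.pyRange 0 ((l.length : Int) - 1) 1).foldl (fun matching_pairs i =>
      (PySem.List.pyRange (i + 1) (l.length : Int) 1).foldl (fun matching_pairs j =>
        if sd.contains (PySem.List.pyGetD l i 0)
            && sd.contains (PySem.List.pyGetD l j 0) then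
          matching_pairs ++ [(PySem.List.pyGetD l i 0, PySem.List.pyGetD l j 0)]
        else matching_pairs) matching_pairs) []
    = pairsSpec (fun y => sd.contains y) l := by
  have hinner : ∀ (acc : List (Int × Int)) (i : Int),
      i ∈ PySem.List.pyRange 0 ((l.length : Int) - 1) 1 →
      (PySem.List.pyRange (i + 1) (l.length : Int) 1).foldl (fun matching_pairs j =>
        if sd.contains (PySem.List.pyGetD l i 0)
            && sd.contains (PySem.List.pyGetD l j 0) then
          matching_pairs ++ [(PySem.List.pyGetD l i 0, PySem.List.pyGetD l j 0)]
        else matching_pairs) acc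
      = acc ++ ((l.drop (i + 1).toNat).filter
            (fun y => sd.contains (PySem.List.pyGetD l i 0) && sd.contains y)).map
          (fun y => (PySem.List.pyGetD l i 0, y)) := by
    intro acc i hi
    have h0 : 0 ≤ i := (PySem.List.mem_pyRange_one.mp hi).1
    rw [PySem.List.foldl_pyRange_pyGetD' l 0
      (fun a y => if sd.contains (PySem.List.pyGetD l i 0) && sd.contains y then
        a ++ [(PySem.List.pyGetD l i 0, y)] else a) acc (by omega : (0:Int) ≤ i + 1)]
    exact PySem.List.foldl_append_if _ _ _ _
  rw [PySem.List.foldl_congr_mem _ _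
    (fun acc i => acc ++ ((l.drop (i + 1).toNat).filter
        (fun y => sd.contains (PySem.List.pyGetD l i 0) && sd.contains y)).map
      (fun y => (PySem.List.pyGetD l i 0, y))) [] hinner,
    PySem.List.foldl_append_eq_flatMap, List.nil_append]
  rw [← aTerm_flatMap_pred (fun y => sd.contains y) l]
  cases l with
  | nil => simp [PySem.List.pyRange_one_eq_nil]
  | cons x xs =>
    have hn : (((x :: xs).length : Int) - 1) = ((xs.length : Nat) : Int) := by
      simp
    rw [hn, PySem.List.pyRange_zero_natCast, List.flatMap_map]
    have hlen : (x :: xs).length - 1 = xs.length := by simp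
    rw [hlen]
    exact congrArg (fun g => List.flatMap g (List.range xs.length))
      (funext fun k => by simp [aTerm])

theorem pairsLoop_filter (p : Int → Bool) (l : List Int) :
    ∀ acc, pairsLoop acc (l.filter p) = acc ++ pairsSpec p l := by
  induction l with
  | nil => intro acc; simp [pairsLoop, pairsSpec]
  | cons x xs ih =>
    intro acc
    cases hp : p x with
    | false =>
      rw [List.filter_cons_of_neg (by simp [hp]), ih acc]
      simp [pairsSpec, hp]
    | true =>
      rw [List.filter_cons_of_pos hp]
      simp only [pairsLoop]
      rw [ih]
      simp [pairsSpec, hp, List.append_assoc]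

-- ===== VERDICT (by name: the statement is the Claim_ definition above) =====
theorem evaluate_matching_pairs_py_spec : Claim_equal_evaluate_matching_pairs_py := by
  intro combination draw_numbers _
  show evaluate_matching_pairs_py combination draw_numbers
      = evaluate_matching_pairs_py_alt combination draw_numbers
  simp only [evaluate_matching_pairs_py, evaluate_matching_pairs_py_alt]
  rw [loopA_eq]
  have hfilter : (PySem.List.sorted combination (fun x => x) false).filter
        (fun n => (PySem.Set.ofList draw_numbers).contains n)
      = (PySem.List.sorted combination (fun x => x) false).filter
        (fun y => (PySem.List.sorted draw_numbers (fun x => x) false).contains y) := by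
    apply List.filter_congr; intro y _
    simp [PySem.Set.mem_ofList, PySem.List.mem_sorted]
  rw [hfilter, pairsLoop_filter, List.nil_append]
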